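-- pv_equiv track=rewrite | github.com/eladsegal/less-bimodal-sup | src/utils/spans.py | _get_sequence_boundaries
-- ===== SOURCE A (Python) =====
-- from typing import List, Tuple, Sequence
--
-- def _get_sequence_boundaries(special_tokens_mask: List[int]) -> List[Tuple[int, int]]:
--     """
--     Returns the token index boundaries of a sequence that was encoded together with other sequences,
--     by using special_tokens_mask.
--     """
--     boundaries = []
--     start_index = None
--     special_sequence = True
--     for i, value in enumerate(special_tokens_mask):
--         if value == 0:
--             if special_sequence is True:
--                 start_index = i
--                 special_sequence = False
--         elif value == 1:
--             if special_sequence is False: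
--                 boundaries.append((start_index, (i - 1)))
--                 special_sequence = True
--     if special_sequence is False:
--         boundaries.append((start_index, len(special_tokens_mask) - 1))
--     return boundaries
-- ===== SOURCE B (Python) =====
-- from typing import List, Tuple
--
-- def _get_sequence_boundaries(special_tokens_mask: List[int]) -> List[Tuple[int, int]]:
--     # Pass 1: forward-fill an "open" state over the mask (0 opens, 1 closes,
--     # any other value carries the prevailing state; closed before any 0/1).
--     states = []
--     state = False
--     for v in special_tokens_mask:
--         if v == 0:
--             state = True
--         elif v == 1:
--             state = False
--         states.append(state)
--     # Pass 2: emit one (start, end) pair per maximal contiguous run of True.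
--     boundaries = []
--     i = 0
--     n = len(states)
--     while i < n:
--         if states[i]:
--             run = 1
--             while i + run < n and states[i + run]:
--                 run += 1
--             boundaries.append((i, i + run - 1))
--             i += run
--         else:
--             i += 1
--     return boundaries
-- ===== Notes on version B (the rewrite author's own statement) =====
-- stated objective: alternative
-- what changed: Replaces A's single stateful scan (start-index/special-sequence flags with an end-of-list flush) by two passes: forward-fill a boolean open-state array (0 opens, 1 closes, other values carry state), then emit one (start,end) pair per maximal run of True.
import Mathlib
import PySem

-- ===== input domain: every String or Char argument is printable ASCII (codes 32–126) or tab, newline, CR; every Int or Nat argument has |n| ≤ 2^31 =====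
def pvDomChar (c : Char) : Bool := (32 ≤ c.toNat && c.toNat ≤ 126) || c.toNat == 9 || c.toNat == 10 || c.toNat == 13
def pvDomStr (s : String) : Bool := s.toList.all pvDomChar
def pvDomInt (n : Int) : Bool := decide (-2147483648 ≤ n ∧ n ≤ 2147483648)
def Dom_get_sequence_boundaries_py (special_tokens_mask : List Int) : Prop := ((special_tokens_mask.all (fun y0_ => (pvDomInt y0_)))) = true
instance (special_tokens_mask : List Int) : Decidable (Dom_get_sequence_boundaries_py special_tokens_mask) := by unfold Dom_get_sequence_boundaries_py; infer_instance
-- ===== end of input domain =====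

-- B replaces A's single stateful scan by two passes (forward-filled open-state array, then run extraction); alternative decomposition, same O(n) cost.


-- ===== PORT A =====
-- Python A's for-loop: state = (boundaries, start_index : Option Int, special_sequence : Bool).
-- When special_sequence is False, start_index is always `some` (the .getD 0 branch is unreachable).
def loopA : List Int → Int → List (Int × Int) → Option Int → Bool → List (Int × Int) × Option Int × Bool
  | [], _, b, s, sp => (b, s, sp)
  | v :: rest, i, b, s, sp =>
      if v == 0 then
        if sp then loopA rest (i + 1) b (some i) false
        else loopA rest (i + 1) b s sp
      else if v == 1 then
        if sp == false then loopA rest (i + 1) (b ++ [(s.getD 0, i - 1)]) s true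
        else loopA rest (i + 1) b s sp
      else loopA rest (i + 1) b s sp

def get_sequence_boundaries_py (special_tokens_mask : List Int) : List (Int × Int) :=
  match loopA special_tokens_mask 0 [] none true with
  | (b, s, sp) =>
      if sp == false then b ++ [(s.getD 0, (special_tokens_mask.length : Int) - 1)] else b

-- ===== PORT B =====
-- Pass 1 of Source B: forward-fill the open-state array (0 opens, 1 closes, else carry).
def fillStates : List Int → Bool → List Bool
  | [], _ => []
  | v :: rest, st =>
      let st' := if v == 0 then true else if v == 1 then false else st
      st' :: fillStates rest st'

-- inner while of Source B: length of the leading run of `true` (as an Int, as in Python)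
def countTrue : List Bool → Int
  | true :: rest => countTrue rest + 1
  | _ => 0

-- Pass 2 of Source B: the outer while loop over `states`; advancing the index past the run
-- (i += run, run = 1 + leading-true count of the tail) is dropping the leading true-prefix (dropWhile).
def runsB : List Bool → Int → List (Int × Int)
  | [], _ => []
  | false :: rest, i => runsB rest (i + 1)
  | true :: rest, i =>
      let run : Int := countTrue rest + 1
      (i, i + run - 1) :: runsB (rest.dropWhile (· == true)) (i + run)
termination_by l _ => l.length
decreasing_by
  · simp
  · have h := List.length_dropWhile_le (p := (· == true)) (l := rest)
    simp only [List.length_cons]; omega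

def get_sequence_boundaries_py_alt (special_tokens_mask : List Int) : List (Int × Int) :=
  runsB (fillStates special_tokens_mask false) 0

-- ===== PRECONDITION & SPEC =====
def Spec_get_sequence_boundaries_py (special_tokens_mask : List Int) (out : List (Int × Int)) : Prop := out = get_sequence_boundaries_py_alt special_tokens_mask
instance (special_tokens_mask : List Int) (out : List (Int × Int)) : Decidable (Spec_get_sequence_boundaries_py special_tokens_mask out) := by unfold Spec_get_sequence_boundaries_py; infer_instance

-- ===== CLAIM (what is proved, stated in full; the proofs are below) =====
def Claim_equal_get_sequence_boundaries_py : Prop := ∀ (special_tokens_mask : List Int), Dom_get_sequence_boundaries_py special_tokens_mask → Spec_get_sequence_boundaries_py special_tokens_mask (get_sequence_boundaries_py special_tokens_mask)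

-- ===== LEMMAS AND PROOFS =====

-- A's loop followed by its final flush, with the index offset made explicit.
def afterA (rest : List Int) (i : Int) (b : List (Int × Int)) (s : Option Int) (sp : Bool) : List (Int × Int) :=
  match loopA rest i b s sp with
  | (b', s', sp') => if sp' == false then b' ++ [(s'.getD 0, i + (rest.length : Int) - 1)] else b'

-- B's pass 2, currently inside an open run that started at `st`, next index `i`.
def runsCont : List Bool → Int → Int → List (Int × Int)
  | [], i, st => [(st, i - 1)]
  | true :: rest, i, st => runsCont rest (i + 1) st
  | false :: rest, i, st => (st, i - 1) :: runsB rest (i + 1)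

lemma runsCont_eq : ∀ (l : List Bool) (j st : Int),
    runsCont l j st = (st, j + countTrue l - 1) :: runsB (l.dropWhile (· == true)) (j + countTrue l)
  | [], j, st => by simp [runsCont, countTrue, runsB]
  | true :: rest, j, st => by
      rw [runsCont, runsCont_eq rest (j + 1) st]
      have e1 : j + 1 + countTrue rest - 1 = j + countTrue (true :: rest) - 1 := by
        simp [countTrue]; ring
      have e2 : j + 1 + countTrue rest = j + countTrue (true :: rest) := by
        simp [countTrue]; ring
      rw [e1, e2]
      simp [List.dropWhile]
  | false :: rest, j, st => by
      simp [runsCont, countTrue, List.dropWhile, runsB]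

lemma runsB_true (l : List Bool) (j : Int) :
    runsB (true :: l) j = runsCont l (j + 1) j := by
  simp only [runsB]
  rw [runsCont_eq]
  have e1 : j + (countTrue l + 1) - 1 = j + 1 + countTrue l - 1 := by ring
  have e2 : j + (countTrue l + 1) = j + 1 + countTrue l := by ring
  rw [e1, e2]

lemma main_inv : ∀ (rest : List Int) (i : Int) (b : List (Int × Int)),
    (∀ s, afterA rest i b s true = b ++ runsB (fillStates rest false) i) ∧
    (∀ st, afterA rest i b (some st) false = b ++ runsCont (fillStates rest true) i st)
  | [], i, b => by
      constructor <;> intro s <;> simp [afterA, loopA, fillStates, runsB, runsCont]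
  | v :: rest, i, b => by
      have IH := main_inv rest (i + 1)
      constructor
      · intro s
        by_cases h0 : v = 0
        · have h2 : afterA (v :: rest) i b s true = afterA rest (i + 1) b (some i) false := by
            simp [afterA, loopA, h0]; ring_nf
          rw [h2, (IH b).2 i]
          simp only [fillStates, h0]
          norm_num
          rw [runsB_true]
        · by_cases h1 : v = 1
          · have h2 : afterA (v :: rest) i b s true = afterA rest (i + 1) b s true := by
              simp [afterA, loopA, h1]; ring_nf
            rw [h2, (IH b).1 s]
            simp [fillStates, h1, runsB]
          · have h2 : afterA (v :: rest) i b s true = afterA rest (i + 1) b s true := by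
              simp [afterA, loopA, h0, h1]; ring_nf
            rw [h2, (IH b).1 s]
            simp [fillStates, h0, h1, runsB]
      · intro st
        by_cases h0 : v = 0
        · have h2 : afterA (v :: rest) i b (some st) false = afterA rest (i + 1) b (some st) false := by
            simp [afterA, loopA, h0]; ring_nf
          rw [h2, (IH b).2 st]
          simp [fillStates, h0, runsCont]
        · by_cases h1 : v = 1
          · have h2 : afterA (v :: rest) i b (some st) false
                = afterA rest (i + 1) (b ++ [(st, i - 1)]) (some st) true := by
              simp [afterA, loopA, h1]; ring_nf
            rw [h2, (IH (b ++ [(st, i - 1)])).1 (some st)]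
            simp [fillStates, h1, runsCont]
          · have h2 : afterA (v :: rest) i b (some st) false = afterA rest (i + 1) b (some st) false := by
              simp [afterA, loopA, h0, h1]; ring_nf
            rw [h2, (IH b).2 st]
            simp [fillStates, h0, h1, runsCont]

-- ===== VERDICT (by name: the statement is the Claim_ definition above) =====
theorem get_sequence_boundaries_py_spec : Claim_equal_get_sequence_boundaries_py := by
  intro m _
  show get_sequence_boundaries_py m = get_sequence_boundaries_py_alt m
  have h := (main_inv m 0 []).1 none
  simpa [afterA, get_sequence_boundaries_py, get_sequence_boundaries_py_alt] using h
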